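-- pv_equiv track=rewrite | github.com/AdityaSaigal2000/DeepLearningProjects | Seq2Seq Prediction/translation/train.py | word2idx
-- ===== SOURCE A (Python) =====
-- def word2idx(sents):
--     #For a specific language, assing an index to each word and store in a dictionary.
--     idx = 0
--     word_dict = {}
--     for sent in sents:
--         for word in sent.split():
--             if(not word in word_dict):
--                 word_dict[word] = idx
--                 idx +=1
--     return word_dict
-- ===== SOURCE B (Python) =====
-- def word2idx(sents):
--     # Different algorithm: one backward pass leaves each word's FIRST index in a dict
--     # (later, i.e. earlier-position, writes overwrite), then sort by first index and rank.
--     ws = [w for s in sents for w in s.split()]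
--     first = {w: i for i, w in reversed(list(enumerate(ws)))}
--     return {w: r for r, (w, _) in enumerate(sorted(first.items(), key=lambda p: p[1]))}
-- ===== Notes on version B (the rewrite author's own statement) =====
-- stated objective: alternative
-- what changed: Replaces the stateful membership-test-and-counter pass with a rank-by-first-occurrence algorithm: a backward overwrite pass records each word's first index, then the words are sorted by that index and ranked with enumerate.
import Mathlib
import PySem

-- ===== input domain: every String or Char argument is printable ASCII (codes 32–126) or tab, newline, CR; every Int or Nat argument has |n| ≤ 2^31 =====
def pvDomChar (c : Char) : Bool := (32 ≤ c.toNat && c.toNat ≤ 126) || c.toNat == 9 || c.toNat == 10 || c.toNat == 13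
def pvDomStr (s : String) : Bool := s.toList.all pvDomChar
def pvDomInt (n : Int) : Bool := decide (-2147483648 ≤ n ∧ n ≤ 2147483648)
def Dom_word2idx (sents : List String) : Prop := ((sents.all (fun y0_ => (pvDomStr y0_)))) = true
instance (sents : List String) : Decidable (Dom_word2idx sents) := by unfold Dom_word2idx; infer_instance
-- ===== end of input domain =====

-- B replaces A's membership-test-and-counter pass with a different algorithm: a backward overwrite pass records each word's first index, then words are sorted by that index and ranked (alternative decomposition, not claimed faster).


-- ===== PORT A =====
def word2idx (sents : List String) : List (String × Int) :=
  let st :=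
    sents.foldl
      (fun (st : PySem.Dict String Int × Int) sent =>
        (PySem.Str.split₀ sent).foldl
          (fun st word =>
            if st.1.contains word then st else (st.1.insert word st.2, st.2 + 1))
          st)
      (PySem.Dict.empty, 0)
  st.1.items

-- ===== PORT B =====
def word2idx_alt (sents : List String) : List (String × Int) :=
  let ws := sents.flatMap (fun s => PySem.Str.split₀ s)
  let first :=
    ((PySem.List.enumerate ws).reverse).foldl
      (fun (d : PySem.Dict String Int) p => d.insert p.2 p.1) PySem.Dict.empty
  ((PySem.List.enumerate (PySem.List.sorted first.items (fun p => p.2) false)).foldl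
      (fun (d : PySem.Dict String Int) q => d.insert q.2.1 q.1) PySem.Dict.empty).items

-- ===== PRECONDITION & SPEC =====
def Spec_word2idx (sents : List String) (out : List (String × Int)) : Prop := out = word2idx_alt sents
instance (sents : List String) (out : List (String × Int)) : Decidable (Spec_word2idx sents out) := by unfold Spec_word2idx; infer_instance

-- ===== CLAIM (what is proved, stated in full; the proofs are below) =====
def Claim_equal_word2idx : Prop := ∀ (sents : List String), Dom_word2idx sents → Spec_word2idx sents (word2idx sents)

-- ===== LEMMAS AND PROOFS =====

-- ---- A side: the state of A's loop after processing the flat word list ws ----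
def pvState (ws : List String) : PySem.Dict String Int × Int :=
  (PySem.Dict.mk ((PySem.List.enumerate (PySem.List.dedup ws)).map (fun p => (p.2, p.1))),
   ((PySem.List.dedup ws).length : Int))

def pvStep (st : PySem.Dict String Int × Int) (word : String) : PySem.Dict String Int × Int :=
  if st.1.contains word then st else (st.1.insert word st.2, st.2 + 1)

lemma pvState_nil : pvState [] = (PySem.Dict.empty, 0) := rfl

lemma keys_pvState (ws : List String) : (pvState ws).1.keys = PySem.List.dedup ws := by
  simp [pvState, PySem.Dict.keys, List.map_map, Function.comp_def]

lemma pvStep_pvState (ws : List String) (w : String) :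
    pvStep (pvState ws) w = pvState (ws ++ [w]) := by
  by_cases h : w ∈ ws
  · have hdedup : PySem.Set.ofList (ws ++ [w]) = PySem.Set.ofList ws := by
      rw [PySem.Set.ofList_append_singleton, PySem.Set.add, if_pos]
      rw [PySem.Set.contains_iff]
      simpa [← PySem.List.dedup_eq_ofList, PySem.List.mem_dedup] using h
    have hc : (pvState ws).1.contains w = true := by
      rw [PySem.Dict.contains_eq_decide_mem_keys, keys_pvState]
      simpa [PySem.List.mem_dedup] using h
    simp only [pvStep, hc, if_true]
    simp [pvState, hdedup]
  · have hnc : (PySem.Set.ofList ws).contains w = false := by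
      rw [← Bool.not_eq_true, PySem.Set.contains_iff]
      simpa [← PySem.List.dedup_eq_ofList, PySem.List.mem_dedup] using h
    have hdedup : PySem.Set.ofList (ws ++ [w]) = PySem.Set.ofList ws ++ [w] := by
      rw [PySem.Set.ofList_append_singleton, PySem.Set.add, hnc]
      simp
    have hc : (pvState ws).1.contains w = false := by
      rw [PySem.Dict.contains_eq_decide_mem_keys, keys_pvState]
      simpa [PySem.List.mem_dedup] using h
    have hitems : ((pvState ws).1.insert w (pvState ws).2).items
        = (pvState ws).1.items ++ [(w, ((PySem.List.dedup ws).length : Int))] := by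
      rw [PySem.Dict.items_insert, hc]
      rfl
    simp only [pvStep, hc, Bool.false_eq_true, if_false]
    apply Prod.ext
    · apply PySem.Dict.ext
      rw [hitems]
      simp [pvState, hdedup, PySem.List.enumerate_append,
        PySem.List.enumerate_cons, PySem.List.enumerate_nil]
    · simp [pvState, hdedup]

lemma foldl_pvStep (ws acc : List String) :
    ws.foldl pvStep (pvState acc) = pvState (acc ++ ws) := by
  induction ws generalizing acc with
  | nil => simp
  | cons w ws ih =>
      simp only [List.foldl_cons, pvStep_pvState]
      rw [ih]
      simp

lemma nested_foldl (sents : List String) (st : PySem.Dict String Int × Int) :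
    sents.foldl (fun st sent => (PySem.Str.split₀ sent).foldl pvStep st) st
      = (sents.flatMap (fun s => PySem.Str.split₀ s)).foldl pvStep st := by
  induction sents generalizing st with
  | nil => rfl
  | cons s rest ih => simp [List.flatMap_cons, List.foldl_append, ih]

-- ---- B side ----

-- folding Set.add only appends
lemma foldl_add_prefix (suf : List String) (s : PySem.Set String) :
    ∃ rest, suf.foldl PySem.Set.add s = s ++ rest := by
  induction suf generalizing s with
  | nil => exact ⟨[], by simp⟩
  | cons x suf ih =>
      by_cases hc : s.contains x
      · obtain ⟨r, hr⟩ := ih s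
        refine ⟨r, ?_⟩
        simp only [List.foldl_cons, PySem.Set.add, if_pos hc, hr]
      · obtain ⟨r, hr⟩ := ih (s ++ [x])
        refine ⟨x :: r, ?_⟩
        simp only [List.foldl_cons, PySem.Set.add, if_neg hc, hr]
        simp

lemma ofList_append (l1 l2 : List String) :
    PySem.Set.ofList (l1 ++ l2) = l2.foldl PySem.Set.add (PySem.Set.ofList l1) := by
  rw [PySem.Set.ofList_eq_foldl, PySem.Set.ofList_eq_foldl, List.foldl_append]

-- dedup ws splits right before the first occurrence of any of its elements
lemma dedup_split (pre suf : List String) (w : String) (hw : w ∉ pre) :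
    ∃ rest, PySem.List.dedup (pre ++ w :: suf)
      = PySem.Set.ofList pre ++ w :: rest := by
  have hnc : (PySem.Set.ofList pre).contains w = false := by
    rw [← Bool.not_eq_true, PySem.Set.contains_iff]
    simpa [← PySem.List.dedup_eq_ofList, PySem.List.mem_dedup] using hw
  have hadd : PySem.Set.add (PySem.Set.ofList pre) w = PySem.Set.ofList pre ++ [w] := by
    rw [PySem.Set.add, hnc]
    simp
  obtain ⟨rest, hrest⟩ := foldl_add_prefix suf (PySem.Set.ofList pre ++ [w])
  refine ⟨rest, ?_⟩
  rw [PySem.List.dedup_eq_ofList, ofList_append, List.foldl_cons, hadd, hrest]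
  simp

-- the number of distinct words before the k-th distinct word's first occurrence is k
lemma closed_form_index (ws : List String) (k : Nat) (hk : k < (PySem.List.dedup ws).length) :
    ((PySem.Set.ofList
        (ws.take ((PySem.List.index? ws ((PySem.List.dedup ws)[k])).getD 0))).length) = k := by
  set w := (PySem.List.dedup ws)[k] with hw
  have hmem : w ∈ ws := by
    have : w ∈ PySem.List.dedup ws := List.getElem_mem hk
    rwa [PySem.List.mem_dedup] at this
  have hsome : (PySem.List.index? ws w).isSome := (PySem.List.index?_isSome_iff _ _).mpr hmem
  obtain ⟨i, hi⟩ := Option.isSome_iff_exists.mp hsome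
  obtain ⟨pre, suf, hws, hlen, hpre⟩ := (PySem.List.index?_eq_some_iff ws w i).mp hi
  have htake : ws.take ((PySem.List.index? ws w).getD 0) = pre := by
    rw [hi, Option.getD_some, ← hlen, hws]
    simp
  rw [htake]
  obtain ⟨rest, hsplit⟩ := dedup_split pre suf w hpre
  have hlen2 : (PySem.Set.ofList pre).length < (PySem.List.dedup ws).length := by
    rw [hws, hsplit]
    simp
  have hidx : (PySem.List.dedup ws)[(PySem.Set.ofList pre).length]'hlen2 = w := by
    have hopt : (PySem.List.dedup ws)[(PySem.Set.ofList pre).length]? = some w := by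
      rw [hws, hsplit, List.getElem?_append_right (Nat.le_refl _)]
      simp
    exact Option.some.inj ((List.getElem?_eq_getElem hlen2).symm.trans hopt)
  have hnodup : (PySem.List.dedup ws).Nodup := PySem.List.nodup_dedup _
  have hkeq : k = (PySem.Set.ofList pre).length :=
    (hnodup.getElem_inj_iff (hi := hk) (hj := hlen2)).mp (by rw [hidx, ← hw])
  omega

-- the value held for key w after folding inserts of (value, key) pairs: the LAST write wins
def pvLastVal (l : List (Int × String)) (w : String) : Int :=
  ((l.reverse.find? (fun p => p.2 == w)).map Prod.fst).getD 0

-- the dict built by B's backward pass: keys in first-insertion order, last write wins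
lemma pairs_fold (l : List (Int × String)) :
    (l.foldl (fun (d : PySem.Dict String Int) p => d.insert p.2 p.1) PySem.Dict.empty).items
      = (PySem.List.dedup (l.map Prod.snd)).map (fun w => (w, pvLastVal l w)) := by
  induction l using List.reverseRecOn with
  | nil => rfl
  | append_singleton l p ih =>
      rw [List.foldl_append, List.foldl_cons, List.foldl_nil]
      simp only [List.map_append, List.map_cons, List.map_nil]
      have hlast : ∀ w', pvLastVal (l ++ [p]) w'
          = if p.2 == w' then p.1 else pvLastVal l w' := by
        intro w'
        simp only [pvLastVal, List.reverse_append, List.reverse_cons, List.reverse_nil,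
          List.nil_append, List.cons_append, List.find?_cons]
        by_cases hp : p.2 = w'
        · simp [hp]
        · have hb : (p.2 == w') = false := by simpa using hp
          simp [hb]
      have hkeys : (l.foldl (fun (d : PySem.Dict String Int) p => d.insert p.2 p.1)
            PySem.Dict.empty).contains p.2 = decide (p.2 ∈ l.map Prod.snd) := by
        rw [PySem.Dict.contains_eq_decide_mem_keys]
        simp [PySem.Dict.keys, ih, List.map_map, Function.comp_def]
      by_cases hmem : p.2 ∈ l.map Prod.snd
      · have hdedup : PySem.List.dedup (l.map Prod.snd ++ [p.2])
            = PySem.List.dedup (l.map Prod.snd) := by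
          rw [PySem.List.dedup_eq_ofList, PySem.List.dedup_eq_ofList,
            PySem.Set.ofList_append_singleton, PySem.Set.add, if_pos]
          rw [PySem.Set.contains_iff]
          simpa [← PySem.List.dedup_eq_ofList, PySem.List.mem_dedup] using hmem
        rw [PySem.Dict.items_insert, hkeys, decide_eq_true hmem, if_pos rfl, ih, hdedup,
          List.map_map]
        apply List.map_congr_left
        intro u _
        by_cases hu : p.2 = u
        · simp [hu, hlast]
        · have hu' : u ≠ p.2 := fun h => hu h.symm
          simp [hu', hlast, hu]
      · have hnc : (PySem.Set.ofList (l.map Prod.snd)).contains p.2 = false := by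
          rw [← Bool.not_eq_true, PySem.Set.contains_iff]
          simpa [← PySem.List.dedup_eq_ofList, PySem.List.mem_dedup] using hmem
        have hdedup : PySem.List.dedup (l.map Prod.snd ++ [p.2])
            = PySem.List.dedup (l.map Prod.snd) ++ [p.2] := by
          rw [PySem.List.dedup_eq_ofList, PySem.List.dedup_eq_ofList,
            PySem.Set.ofList_append_singleton, PySem.Set.add, hnc]
          simp
        rw [PySem.Dict.items_insert, hkeys, decide_eq_false hmem]
        simp only [Bool.false_eq_true, if_false]
        rw [ih, hdedup, List.map_append]
        congr 1
        · apply List.map_congr_left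
          intro u hu
          have hune : p.2 ≠ u := by
            intro h
            exact hmem (by rw [← h] at hu; rw [h] at hu ⊢; simpa [PySem.List.mem_dedup] using hu)
          simp [hlast, hune]
        · simp [hlast]

-- the last write for w in the backward pass is w's FIRST index in ws
lemma lastVal_rev_enumerate (ws : List String) (w : String) (hw : w ∈ ws) :
    pvLastVal ((PySem.List.enumerate ws).reverse) w
      = (((PySem.List.index? ws w).getD 0 : Nat) : Int) := by
  have hsome : (PySem.List.index? ws w).isSome := (PySem.List.index?_isSome_iff _ _).mpr hw
  obtain ⟨i, hi⟩ := Option.isSome_iff_exists.mp hsome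
  obtain ⟨pre, suf, hws, hlen, hpre⟩ := (PySem.List.index?_eq_some_iff ws w i).mp hi
  have hfind : (PySem.List.enumerate ws).find? (fun p => p.2 == w)
      = some ((pre.length : Int), w) := by
    rw [hws, PySem.List.enumerate_append, List.find?_append]
    have hnone : (PySem.List.enumerate pre).find? (fun p => p.2 == w) = none := by
      rw [List.find?_eq_none]
      intro p hp
      obtain ⟨k, hkl, hpk⟩ := (PySem.List.mem_enumerate_iff _ _ _).mp hp
      subst hpk
      have hne : pre[k] ≠ w := fun h => hpre (h ▸ List.getElem_mem hkl)
      simpa using hne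
    rw [hnone, Option.none_or, PySem.List.enumerate_cons, List.find?_cons]
    simp
  simp only [pvLastVal, List.reverse_reverse, hfind, hi]
  simp [hlen]

-- the first indices are strictly increasing along dedup ws
lemma firstIdx_strictMono (ws : List String) (j k : Nat) (hjk : j < k)
    (hk : k < (PySem.List.dedup ws).length) :
    ((PySem.List.index? ws ((PySem.List.dedup ws)[j]'(by omega))).getD 0)
      < ((PySem.List.index? ws ((PySem.List.dedup ws)[k])).getD 0) := by
  have hj : j < (PySem.List.dedup ws).length := by omega
  set a := (PySem.List.index? ws ((PySem.List.dedup ws)[j]'hj)).getD 0 with ha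
  set b := (PySem.List.index? ws ((PySem.List.dedup ws)[k])).getD 0 with hb
  have hca := closed_form_index ws j hj
  have hcb := closed_form_index ws k hk
  by_contra hle
  have hba : b ≤ a := by omega
  have hmono : ((PySem.Set.ofList (ws.take b)).length)
      ≤ ((PySem.Set.ofList (ws.take a)).length) := by
    have htak : ws.take a = ws.take b ++ ((ws.drop b).take (a - b)) := by
      rw [← List.take_append_drop b (ws.take a)]
      congr 1
      · rw [List.take_take, Nat.min_eq_left hba]
      · rw [List.drop_take]
    rw [htak, PySem.List.dedup_eq_ofList] at *
    obtain ⟨rest, hrest⟩ := foldl_add_prefix ((ws.drop b).take (a - b)) (PySem.Set.ofList (ws.take b))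
    rw [ofList_append, hrest]
    simp
  rw [← ha, ← hb] at *
  omega

-- appending distinct new keys: B's ranking fold appends one item per key
lemma rank_fold (L : List (String × Int)) (s : Int) (d : PySem.Dict String Int)
    (hnodup : (L.map Prod.fst).Nodup) (hfresh : ∀ p ∈ L, d.contains p.1 = false) :
    ((PySem.List.enumerate L s).foldl
        (fun (d : PySem.Dict String Int) q => d.insert q.2.1 q.1) d).items
      = d.items ++ (PySem.List.enumerate L s).map (fun q => (q.2.1, q.1)) := by
  induction L generalizing s d with
  | nil => simp [PySem.List.enumerate_nil]
  | cons p L ih =>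
      rw [PySem.List.enumerate_cons, List.foldl_cons]
      have hc : d.contains p.1 = false := hfresh p (List.mem_cons_self)
      have hitems : (d.insert p.1 s).items = d.items ++ [(p.1, s)] := by
        rw [PySem.Dict.items_insert, hc]
        rfl
      have hkeys2 : (d.insert p.1 s).keys = d.keys ++ [p.1] := by
        simp [PySem.Dict.keys, hitems]
      have hfresh2 : ∀ q ∈ L, (d.insert p.1 s).contains q.1 = false := by
        intro q hq
        rw [PySem.Dict.contains_eq_decide_mem_keys, hkeys2]
        have h1 : q.1 ∉ d.keys := by
          have := hfresh q (List.mem_cons_of_mem _ hq)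
          rw [PySem.Dict.contains_eq_decide_mem_keys] at this
          simpa using this
        have h2 : q.1 ≠ p.1 := by
          intro h
          rw [List.map_cons, List.nodup_cons] at hnodup
          exact hnodup.1 (h ▸ List.mem_map_of_mem hq)
        simp [h1, h2]
      rw [ih (s + 1) (d.insert p.1 s) (by
            rw [List.map_cons, List.nodup_cons] at hnodup; exact hnodup.2) hfresh2,
        hitems]
      simp

-- ===== VERDICT (by name: the statement is the Claim_ definition above) =====
theorem word2idx_spec : Claim_equal_word2idx := by
  intro sents _
  show word2idx sents = word2idx_alt sents
  set ws := sents.flatMap (fun s => PySem.Str.split₀ s) with hws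
  -- A's result
  have hA : word2idx sents
      = (PySem.List.enumerate (PySem.List.dedup ws)).map (fun p => (p.2, p.1)) := by
    have h : (sents.foldl
        (fun (st : PySem.Dict String Int × Int) sent =>
          (PySem.Str.split₀ sent).foldl
            (fun st word =>
              if st.1.contains word then st else (st.1.insert word st.2, st.2 + 1)) st)
        (PySem.Dict.empty, 0)) = pvState ws := by
      have h1 := nested_foldl sents (pvState [])
      have h2 := foldl_pvStep ws []
      rw [List.nil_append] at h2
      rw [h2] at h1
      simpa [pvStep, pvState_nil] using h1
    simp only [word2idx, h, pvState]
  -- B's first dict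
  have hfirst : (((PySem.List.enumerate ws).reverse).foldl
        (fun (d : PySem.Dict String Int) p => d.insert p.2 p.1) PySem.Dict.empty).items
      = (PySem.List.dedup ws.reverse).map
          (fun w => (w, (((PySem.List.index? ws w).getD 0 : Nat) : Int))) := by
    rw [pairs_fold]
    have hmapsnd : ((PySem.List.enumerate ws).reverse).map Prod.snd = ws.reverse := by
      rw [List.map_reverse, PySem.List.map_snd_enumerate]
    rw [hmapsnd]
    apply List.map_congr_left
    intro u hu
    have humem : u ∈ ws := by
      rw [PySem.List.mem_dedup, List.mem_reverse] at hu
      exact hu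
    rw [lastVal_rev_enumerate ws u humem]
  -- B's sorted list
  have hsorted : PySem.List.sorted
        ((PySem.List.dedup ws.reverse).map
          (fun w => (w, (((PySem.List.index? ws w).getD 0 : Nat) : Int))))
        (fun p => p.2) false
      = (PySem.List.dedup ws).map
          (fun w => (w, (((PySem.List.index? ws w).getD 0 : Nat) : Int))) := by
    apply PySem.List.sorted_eq_of_perm_of_pairwise_lt
    · apply List.Perm.map
      rw [List.perm_ext_iff_of_nodup (PySem.List.nodup_dedup _) (PySem.List.nodup_dedup _)]
      intro a
      simp
    · rw [List.pairwise_map, List.pairwise_iff_getElem]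
      intro j k hj hk hjk
      have := firstIdx_strictMono ws j k hjk hk
      simp only []
      omega
  -- B's ranking fold
  have hB : word2idx_alt sents
      = (PySem.List.enumerate
          ((PySem.List.dedup ws).map
            (fun w => (w, (((PySem.List.index? ws w).getD 0 : Nat) : Int)))) 0).map
          (fun q => (q.2.1, q.1)) := by
    simp only [word2idx_alt, ← hws]
    rw [hfirst, hsorted, rank_fold]
    · rfl
    · rw [List.map_map]
      simp [Function.comp_def]
    · intro p _
      rfl
  rw [hA, hB]
  apply List.ext_getElem
  · simp [PySem.List.length_enumerate]
  · intro k h1 h2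
    have hk : k < (PySem.List.dedup ws).length := by
      simp [PySem.List.length_enumerate] at h1
      exact h1
    rw [List.getElem_map, List.getElem_map, PySem.List.getElem_enumerate,
      PySem.List.getElem_enumerate, List.getElem_map]
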